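-- pv_equiv track=rewrite | github.com/NoodleSamaChan/AoC | 2018/02/02.py | difference_replacer
-- ===== SOURCE A (Python) =====
-- def difference_replacer(elements_to_check):
--     final_string = ''
--     for i in elements_to_check:
--         for j in elements_to_check:
--             for k in range(len(i)):
--                 if i[k] != j[k]:
--                     final_string = i.replace(i[k], '')
--
--     return final_string
-- ===== SOURCE B (Python) =====
-- def difference_replacer(elements_to_check):
--     # A's triple loop keeps overwriting final_string; only the last differing
--     # pair (in iteration order) matters, and the last element is always the
--     # last differing `i` when any pair differs.  One backward scan suffices.
--     if not elements_to_check: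
--         return ''
--     last = elements_to_check[-1]
--     for j in reversed(elements_to_check):
--         if j != last:
--             k = max(p for p in range(len(last)) if last[p] != j[p])
--             return last.replace(last[k], '')
--     return ''
-- ===== Notes on version B (the rewrite author's own statement) =====
-- stated objective: faster
-- what changed: A's triple nested loop repeatedly overwrites final_string; B observes that the last overwrite always comes from the last element paired with the last element differing from it at the largest mismatching position, so one backward scan plus one position scan replaces the O(n^2*L) loops.
import Mathlib
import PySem

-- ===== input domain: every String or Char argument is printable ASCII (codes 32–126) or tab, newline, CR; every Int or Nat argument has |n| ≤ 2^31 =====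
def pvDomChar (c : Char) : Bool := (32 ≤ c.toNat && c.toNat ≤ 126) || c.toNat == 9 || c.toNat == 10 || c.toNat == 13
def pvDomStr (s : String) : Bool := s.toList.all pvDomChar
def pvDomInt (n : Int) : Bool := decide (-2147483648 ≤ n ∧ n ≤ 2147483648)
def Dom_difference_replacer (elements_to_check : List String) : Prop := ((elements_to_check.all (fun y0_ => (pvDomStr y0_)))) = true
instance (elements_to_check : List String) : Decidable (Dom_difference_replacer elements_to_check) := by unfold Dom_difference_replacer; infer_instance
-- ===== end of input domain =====

-- B replaces A's triple nested loop (last overwrite wins) by a single backward scan: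
-- the last element is always the relevant `i`, the last differing `j` and the largest
-- differing position give the final assignment; objective: faster.


-- ===== PORT A =====
def difference_replacer (elements_to_check : List String) : String :=
  elements_to_check.foldl (fun fs i =>
    elements_to_check.foldl (fun fs j =>
      (PySem.List.pyRange 0 (PySem.Str.len i) 1).foldl (fun fs k =>
        match PySem.Str.pyGet? i k, PySem.Str.pyGet? j k with
        | some ci, some cj =>
            if ci ≠ cj then PySem.Str.replace i (String.mk [ci]) "" else fs
        | _, _ => fs) fs) fs) ""

-- ===== PORT B =====
def difference_replacer_alt (elements_to_check : List String) : String :=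
  match elements_to_check.getLast? with
  | none => ""
  | some last =>
    match elements_to_check.reverse.find? (fun j => decide (j ≠ last)) with
    | none => ""
    | some j =>
      match PySem.List.max? ((PySem.List.pyRange 0 (PySem.Str.len last) 1).filter
              (fun p => decide (PySem.Str.pyGet? last p ≠ PySem.Str.pyGet? j p))) id with
      | some k =>
        match PySem.Str.pyGet? last k with
        | some c => PySem.Str.replace last (String.mk [c]) ""
        | none => ""
      | none => ""

-- ===== PRECONDITION & SPEC =====
-- Pre_ excludes exactly the inputs on which A raises IndexError (two elements of
-- different lengths make `j[k]` go out of range); A returns on all other inputs.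
def Pre_difference_replacer (elements_to_check : List String) : Prop :=
  ∀ s ∈ elements_to_check, ∀ t ∈ elements_to_check, PySem.Str.len s = PySem.Str.len t
instance (elements_to_check : List String) : Decidable (Pre_difference_replacer elements_to_check) := by unfold Pre_difference_replacer; infer_instance
def pvWitness_difference_replacer : List String := ["abc", "abd", "abc"]

def Spec_difference_replacer (elements_to_check : List String) (out : String) : Prop := out = difference_replacer_alt elements_to_check
instance (elements_to_check : List String) (out : String) : Decidable (Spec_difference_replacer elements_to_check out) := by unfold Spec_difference_replacer; infer_instance

-- ===== CLAIM (what is proved, stated in full; the proofs are below) =====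
def Claim_equal_difference_replacer : Prop := ∀ (elements_to_check : List String), Dom_difference_replacer elements_to_check → Pre_difference_replacer elements_to_check → Spec_difference_replacer elements_to_check (difference_replacer elements_to_check)

-- ===== LEMMAS AND PROOFS =====

/-- The optional assignment a single mismatch check `(i, j, k)` makes in A. -/
def pvMism (i j : String) (k : Int) : Option String :=
  match PySem.Str.pyGet? i k, PySem.Str.pyGet? j k with
  | some ci, some cj =>
      if ci ≠ cj then some (PySem.Str.replace i (String.mk [ci]) "") else none
  | _, _ => none

/-- The value `i.replace(i[k], '')` (dummy "" when out of range). -/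
def pvVal (i : String) (k : Int) : String :=
  match PySem.Str.pyGet? i k with
  | some c => PySem.Str.replace i (String.mk [c]) ""
  | none => ""

/-- Result of A's inner `k` loop viewed as an optional last assignment. -/
def pvF (i j : String) : Option String :=
  ((PySem.List.pyRange 0 (PySem.Str.len i) 1).filterMap (pvMism i j)).getLast?

/-- Result of A's middle `j` loop viewed as an optional last assignment. -/
def pvU (xs : List String) (i : String) : Option String :=
  (xs.filterMap (pvF i)).getLast?

theorem pv_foldl_opt {α β : Type} (u : α → Option β) (L : List α) (init : β) :
    L.foldl (fun s x => (u x).getD s) init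
      = ((L.filterMap u).getLast?).getD init := by
  induction L generalizing init with
  | nil => rfl
  | cons x t ih =>
    simp only [List.foldl_cons, List.filterMap_cons]
    cases hx : u x with
    | none => exact ih init
    | some v =>
      rw [Option.getD_some, ih v, List.getLast?_cons]
      cases (t.filterMap u).getLast? <;> rfl

theorem pv_getLast?_filterMap {α β : Type} (g : α → Option β) (l : List α) :
    (l.filterMap g).getLast? = (l.reverse.find? (fun x => (g x).isSome)).bind g := by
  rw [← List.head?_reverse, ← List.filterMap_reverse]
  generalize l.reverse = m
  induction m with
  | nil => rfl
  | cons x t ih =>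
    simp only [List.filterMap_cons, List.find?_cons]
    cases hx : g x with
    | none => simpa [hx] using ih
    | some v => simp [hx]

theorem pv_filterMap_eq_map_filter {α β : Type} (u : α → Option β) (p : α → Bool)
    (v : α → β) (l : List α)
    (h : ∀ x ∈ l, u x = if p x then some (v x) else none) :
    l.filterMap u = (l.filter p).map v := by
  induction l with
  | nil => rfl
  | cons x t ih =>
    have hx := h x (by simp)
    have ht := ih (fun y hy => h y (by simp [hy]))
    by_cases hp : p x = true
    · simp [hx, hp, ht]
    · simp only [Bool.not_eq_true] at hp
      simp [hx, hp, ht]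

theorem pv_max?_sorted (l : List Int) :
    l.Pairwise (· < ·) → PySem.List.max? l id = l.getLast? := by
  unfold PySem.List.max?
  induction l using List.reverseRecOn with
  | nil => intro _; rfl
  | append_singleton l a ih =>
    intro h
    have hp := List.pairwise_append.mp h
    rw [List.foldl_append, List.foldl_cons, List.foldl_nil, ih hp.1, List.getLast?_concat]
    cases hl : l.getLast? with
    | none => rfl
    | some m =>
      have hm : m ∈ l := List.mem_of_getLast? hl
      have hma : m < a := hp.2.2 m hm a (by simp)
      simp [hma]

theorem pv_mism_self (i : String) (k : Int) : pvMism i i k = none := by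
  unfold pvMism
  cases PySem.Str.pyGet? i k <;> simp

theorem pv_F_self (i : String) : pvF i i = none := by
  unfold pvF
  rw [List.filterMap_eq_nil_iff.mpr (fun k _ => pv_mism_self i k)]
  rfl

theorem pv_find?_congr {α : Type} (p q : α → Bool) (l : List α)
    (h : ∀ x ∈ l, p x = q x) : l.find? p = l.find? q := by
  induction l with
  | nil => rfl
  | cons x t ih =>
    have hx := h x (by simp)
    simp only [List.find?_cons, hx]
    cases q x
    · exact ih (fun y hy => h y (by simp [hy]))
    · rfl

/-- A's nested folds compute the last assignment over all (i, j, k) triples. -/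
theorem pv_A_eq (xs : List String) :
    difference_replacer xs = ((xs.filterMap (pvU xs)).getLast?).getD "" := by
  unfold difference_replacer
  have hstep : ∀ i j : String,
      (fun (fs : String) (k : Int) =>
        match PySem.Str.pyGet? i k, PySem.Str.pyGet? j k with
        | some ci, some cj =>
            if ci ≠ cj then PySem.Str.replace i (String.mk [ci]) "" else fs
        | _, _ => fs)
      = (fun fs k => (pvMism i j k).getD fs) := by
    intro i j; funext fs k; unfold pvMism
    cases PySem.Str.pyGet? i k with
    | none => rfl
    | some ci =>
      cases PySem.Str.pyGet? j k with
      | none => rfl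
      | some cj => by_cases hc : ci = cj <;> simp [hc]
  have hmid : ∀ (i : String),
      (fun (fs : String) (j : String) =>
        (PySem.List.pyRange 0 (PySem.Str.len i) 1).foldl (fun fs k =>
          match PySem.Str.pyGet? i k, PySem.Str.pyGet? j k with
          | some ci, some cj =>
              if ci ≠ cj then PySem.Str.replace i (String.mk [ci]) "" else fs
          | _, _ => fs) fs)
      = (fun fs j => (pvF i j).getD fs) := by
    intro i; funext fs j
    rw [hstep i j, pv_foldl_opt (pvMism i j) (PySem.List.pyRange 0 (PySem.Str.len i) 1) fs]
    rfl
  have houter :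
      (fun (fs : String) (i : String) =>
        xs.foldl (fun fs j =>
          (PySem.List.pyRange 0 (PySem.Str.len i) 1).foldl (fun fs k =>
            match PySem.Str.pyGet? i k, PySem.Str.pyGet? j k with
            | some ci, some cj =>
                if ci ≠ cj then PySem.Str.replace i (String.mk [ci]) "" else fs
            | _, _ => fs) fs) fs)
      = (fun fs i => (pvU xs i).getD fs) := by
    funext fs i
    rw [hmid i, pv_foldl_opt (pvF i) xs fs]
    rfl
  rw [houter, pv_foldl_opt (pvU xs) xs ""]

/-- For equal-length strings the mismatch options are characterized on the range. -/
theorem pv_mism_eq (i j : String) (k : Int) (h0 : 0 ≤ k) (h1 : k < (i.toList.length : Int))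
    (hlen : i.toList.length = j.toList.length) :
    pvMism i j k = if (decide (PySem.Str.pyGet? i k ≠ PySem.Str.pyGet? j k)) then some (pvVal i k)
                   else none := by
  have hki : k.toNat < i.toList.length := by omega
  have hkj : k.toNat < j.toList.length := by omega
  have hgi : PySem.Str.pyGet? i k = some (i.toList[k.toNat]) := by
    simp [PySem.List.pyGet?_of_nonneg _ h0, List.getElem?_eq_getElem hki]
  have hgj : PySem.Str.pyGet? j k = some (j.toList[k.toNat]) := by
    simp [PySem.List.pyGet?_of_nonneg _ h0, List.getElem?_eq_getElem hkj]
  unfold pvMism pvVal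
  rw [hgi, hgj]
  by_cases hc : i.toList[k.toNat] = j.toList[k.toNat] <;> simp [hc]

/-- Inner-loop characterization: pvF is the value at the largest mismatch position. -/
theorem pv_F_eq (i j : String) (hlen : i.toList.length = j.toList.length) :
    pvF i j = (((PySem.List.pyRange 0 (PySem.Str.len i) 1).filter
        (fun p => decide (PySem.Str.pyGet? i p ≠ PySem.Str.pyGet? j p))).getLast?).map (pvVal i) := by
  unfold pvF
  rw [pv_filterMap_eq_map_filter (pvMism i j)
        (fun p => decide (PySem.Str.pyGet? i p ≠ PySem.Str.pyGet? j p)) (pvVal i)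
        _ (fun k hk => by
          have hm := PySem.List.mem_pyRange_one.mp hk
          exact pv_mism_eq i j k hm.1 (by have := hm.2; simpa [PySem.Str.len_eq] using this) hlen),
      List.getLast?_map]

/-- For distinct equal-length strings there is a mismatch position in range. -/
theorem pv_filter_ne_nil (i j : String) (hlen : i.toList.length = j.toList.length)
    (hne : j ≠ i) :
    (PySem.List.pyRange 0 (PySem.Str.len i) 1).filter
        (fun p => decide (PySem.Str.pyGet? i p ≠ PySem.Str.pyGet? j p)) ≠ [] := by
  intro hnil
  apply hne
  have hall := List.filter_eq_nil_iff.mp hnil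
  rw [← String.toList_inj]
  apply List.ext_getElem?
  intro p
  by_cases hp : p < i.toList.length
  · have hmem : (p : Int) ∈ PySem.List.pyRange 0 (PySem.Str.len i) 1 := by
      rw [PySem.List.mem_pyRange_one]
      constructor
      · exact_mod_cast Nat.zero_le p
      · rw [PySem.Str.len_eq]; exact_mod_cast hp
    have := hall _ hmem
    simp only [decide_not, Bool.not_eq_true', decide_eq_false_iff_not, not_not] at this
    have hgi : PySem.Str.pyGet? i (p : Int) = i.toList[p]? := by simp
    have hgj : PySem.Str.pyGet? j (p : Int) = j.toList[p]? := by simp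
    rw [hgi, hgj] at this
    exact this.symm
  · rw [List.getElem?_eq_none (by omega), List.getElem?_eq_none (by omega)]

/-- pvF i j is some exactly when j ≠ i (equal lengths). -/
theorem pv_F_isSome (i j : String) (hlen : i.toList.length = j.toList.length) :
    (pvF i j).isSome = decide (j ≠ i) := by
  by_cases hne : j = i
  · subst hne
    simp [pv_F_self]
  · rw [pv_F_eq i j hlen]
    have hnn := pv_filter_ne_nil i j hlen hne
    cases hg : ((PySem.List.pyRange 0 (PySem.Str.len i) 1).filter
        (fun p => decide (PySem.Str.pyGet? i p ≠ PySem.Str.pyGet? j p))).getLast? with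
    | none => exact absurd (List.getLast?_eq_none_iff.mp hg) hnn
    | some k => simp [hne]

-- ===== VERDICT (by name: the statement is the Claim_ definition above) =====
theorem difference_replacer_spec : Claim_equal_difference_replacer := by
  unfold Claim_equal_difference_replacer
  intro xs _ hpre
  unfold Spec_difference_replacer
  rw [pv_A_eq]
  rcases List.eq_nil_or_concat xs with rfl | ⟨ys, i0, rfl⟩
  · rfl
  rw [List.concat_eq_append] at *
  have hi0 : i0 ∈ ys ++ [i0] := by simp
  have hlen : ∀ s ∈ ys ++ [i0], s.toList.length = i0.toList.length := by
    intro s hs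
    have := hpre s hs i0 hi0
    simpa [PySem.Str.len_eq] using this
  by_cases hall : ∀ x ∈ ys ++ [i0], x = i0
  · -- all elements equal: both sides are ""
    have hU : ∀ i ∈ ys ++ [i0], pvU (ys ++ [i0]) i = none := by
      intro i hi
      unfold pvU
      rw [List.filterMap_eq_nil_iff.mpr (fun j hj => by
        rw [hall i hi, hall j hj]; exact pv_F_self i0)]
      rfl
    rw [List.filterMap_eq_nil_iff.mpr hU]
    unfold difference_replacer_alt
    have hfind : List.find? (fun j => decide (j ≠ i0)) ((ys ++ [i0]).reverse) = none :=
      List.find?_eq_none.mpr (fun x hx => by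
        have := hall x (List.mem_reverse.mp hx)
        simp [this])
    simp only [List.getLast?_concat, hfind]
    rfl
  · push Not at hall
    obtain ⟨w, hw, hwne⟩ := hall
    -- the last differing partner of i0
    have hsome : ((ys ++ [i0]).reverse.find? (fun j => decide (j ≠ i0))).isSome = true := by
      rw [List.find?_isSome]
      exact ⟨w, List.mem_reverse.mpr hw, by simp [hwne]⟩
    obtain ⟨j0, hj0⟩ := Option.isSome_iff_exists.mp hsome
    have hj0mem : j0 ∈ ys ++ [i0] := List.mem_reverse.mp (List.mem_of_find?_eq_some hj0)
    have hj0ne : j0 ≠ i0 := by simpa using List.find?_some hj0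
    have hlen0 : i0.toList.length = j0.toList.length := (hlen j0 hj0mem).symm
    -- A's value: pvU at i0
    have hU0 : pvU (ys ++ [i0]) i0 = pvF i0 j0 := by
      unfold pvU
      rw [pv_getLast?_filterMap,
          pv_find?_congr (fun x => (pvF i0 x).isSome) (fun j => decide (j ≠ i0)) _
            (fun x hx => pv_F_isSome i0 x (hlen x (List.mem_reverse.mp hx)).symm),
          hj0]
      rfl
    -- the filtered mismatch positions are nonempty and sorted
    have hnn := pv_filter_ne_nil i0 j0 hlen0 hj0ne
    have hpair : ((PySem.List.pyRange 0 (PySem.Str.len i0) 1).filter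
        (fun p => decide (PySem.Str.pyGet? i0 p ≠ PySem.Str.pyGet? j0 p))).Pairwise (· < ·) :=
      List.Pairwise.filter _ (PySem.List.pairwise_lt_pyRange_one 0 (PySem.Str.len i0))
    obtain ⟨k0, hk0⟩ : ∃ k, ((PySem.List.pyRange 0 (PySem.Str.len i0) 1).filter
        (fun p => decide (PySem.Str.pyGet? i0 p ≠ PySem.Str.pyGet? j0 p))).getLast? = some k := by
      cases hg : ((PySem.List.pyRange 0 (PySem.Str.len i0) 1).filter
          (fun p => decide (PySem.Str.pyGet? i0 p ≠ PySem.Str.pyGet? j0 p))).getLast? with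
      | none => exact absurd (List.getLast?_eq_none_iff.mp hg) hnn
      | some k => exact ⟨k, rfl⟩
    have hF0 : pvF i0 j0 = some (pvVal i0 k0) := by
      rw [pv_F_eq i0 j0 hlen0, hk0]; rfl
    -- A's result
    have hA : ((ys ++ [i0]).filterMap (pvU (ys ++ [i0]))).getLast? = some (pvVal i0 k0) := by
      rw [List.filterMap_append]
      have : List.filterMap (pvU (ys ++ [i0])) [i0] = [pvVal i0 k0] := by
        simp [hU0, hF0]
      rw [this, List.getLast?_concat]
    rw [hA]
    -- B's result
    unfold difference_replacer_alt
    simp only [List.getLast?_concat, hj0, pv_max?_sorted _ hpair, hk0]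
    unfold pvVal
    cases PySem.Str.pyGet? i0 k0 <;> rfl
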